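-- pv_equiv track=rewrite | github.com/quanghieu31/advent-of-code | 2023/day12/solution.py | check_current_contiguous_damaged
-- ===== SOURCE A (Python) =====
-- def check_current_contiguous_damaged(springs):
--     groups = []
--     current_group_length = 0
--
--     for s in springs:
--         if s == '#':
--             current_group_length += 1
--         else:
--             if current_group_length > 0:
--                 groups.append(current_group_length)
--                 # reset current length group:
--                 current_group_length = 0
--
--     if current_group_length > 0:
--         groups.append(current_group_length)
--
--     return groups
-- ===== SOURCE B (Python) =====
-- def check_current_contiguous_damaged(springs):
--     # two-pointer run skipping: no running accumulator, no post-loop flush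
--     groups = []
--     n = len(springs)
--     i = 0
--     while i < n:
--         if springs[i] != '#':
--             i += 1
--             continue
--         j = i + 1
--         while j < n and springs[j] == '#':
--             j += 1
--         groups.append(j - i)
--         i = j
--     return groups
-- ===== Notes on version B (the rewrite author's own statement) =====
-- stated objective: alternative
-- what changed: Replaced the char-by-char accumulator loop with its post-loop flush by a two-pointer scan that locates each '#'-run, emits its length j-i, and jumps past it.
import Mathlib
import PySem

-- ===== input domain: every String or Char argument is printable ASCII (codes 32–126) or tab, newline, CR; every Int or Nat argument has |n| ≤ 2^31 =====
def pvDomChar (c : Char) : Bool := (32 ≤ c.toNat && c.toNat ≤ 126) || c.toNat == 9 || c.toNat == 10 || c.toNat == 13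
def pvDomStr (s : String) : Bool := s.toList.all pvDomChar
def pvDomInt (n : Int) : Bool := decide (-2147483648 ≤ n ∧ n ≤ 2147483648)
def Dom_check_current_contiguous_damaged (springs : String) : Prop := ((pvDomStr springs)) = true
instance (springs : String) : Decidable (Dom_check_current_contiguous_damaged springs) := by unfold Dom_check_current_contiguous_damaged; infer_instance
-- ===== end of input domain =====

-- B replaces A's char accumulator + post-loop flush by a run-skipping recursion; objective: alternative (same O(n) cost).


-- ===== PORT A =====
-- A: fold over the characters with state (groups, current_group_length), then a final flush.
def pvStepA (st : List Int × Int) (s : Char) : List Int × Int :=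
  if s = '#' then (st.1, st.2 + 1)
  else if st.2 > 0 then (st.1 ++ [st.2], 0) else st

def check_current_contiguous_damaged (springs : String) : List Int :=
  let st := springs.toList.foldl pvStepA ([], 0)
  if st.2 > 0 then st.1 ++ [st.2] else st.1

-- ===== PORT B =====
-- B's inner while loop: count of leading '#' characters.
def pvLead : List Char → Nat
  | [] => 0
  | c :: rest => if c = '#' then pvLead rest + 1 else 0

-- B: if head is not '#', recurse on the tail; else emit the leading run's length and recurse past it.
def pvRunsB : List Char → List Int
  | [] => []
  | c :: rest =>
    if c ≠ '#' then pvRunsB rest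
    else
      let k := 1 + pvLead rest
      (k : Int) :: pvRunsB ((c :: rest).drop k)
termination_by l => l.length
decreasing_by
  all_goals simp only [List.length_drop, List.length_cons]
  all_goals omega

def check_current_contiguous_damaged_alt (springs : String) : List Int :=
  pvRunsB springs.toList

-- ===== PRECONDITION & SPEC =====
def Spec_check_current_contiguous_damaged (springs : String) (out : List Int) : Prop := out = check_current_contiguous_damaged_alt springs
instance (springs : String) (out : List Int) : Decidable (Spec_check_current_contiguous_damaged springs out) := by unfold Spec_check_current_contiguous_damaged; infer_instance

-- ===== CLAIM (what is proved, stated in full; the proofs are below) =====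
def Claim_equal_check_current_contiguous_damaged : Prop := ∀ (springs : String), Dom_check_current_contiguous_damaged springs → Spec_check_current_contiguous_damaged springs (check_current_contiguous_damaged springs)

-- ===== LEMMAS AND PROOFS =====

-- what A's loop will still emit, given a pending run of length cur
def pvEmit : Nat → List Char → List Int
  | cur, [] => if cur > 0 then [(cur : Int)] else []
  | cur, c :: rest =>
    if c = '#' then pvEmit (cur + 1) rest
    else (if cur > 0 then [(cur : Int)] else []) ++ pvEmit 0 rest

theorem pvRunsB_nil : pvRunsB [] = [] := by simp [pvRunsB]

theorem pvRunsB_cons (c : Char) (rest : List Char) :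
    pvRunsB (c :: rest) =
      if c ≠ '#' then pvRunsB rest
      else ((1 + pvLead rest : Nat) : Int) :: pvRunsB (rest.drop (pvLead rest)) := by
  rw [pvRunsB]
  split_ifs with h
  · rfl
  · simp [Nat.add_comm 1 (pvLead rest), List.drop_succ_cons]

theorem pvLoopA_spec (l : List Char) (groups : List Int) (cur : Nat) :
    (let st := l.foldl pvStepA (groups, (cur : Int))
     if st.2 > 0 then st.1 ++ [st.2] else st.1) = groups ++ pvEmit cur l := by
  induction l generalizing groups cur with
  | nil =>
    simp only [List.foldl_nil, pvEmit]
    by_cases h : cur > 0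
    · rw [if_pos (by exact_mod_cast h), if_pos h]
    · have : cur = 0 := by omega
      subst this; simp
  | cons c rest ih =>
    simp only [List.foldl_cons, pvStepA, pvEmit]
    by_cases hc : c = '#'
    · rw [if_pos hc, if_pos hc]
      have : ((cur : Int) + 1) = ((cur + 1 : Nat) : Int) := by push_cast; ring
      rw [this, ih]
    · rw [if_neg hc, if_neg hc]
      by_cases h0 : cur > 0
      · have hp : ((cur : Int)) > 0 := by exact_mod_cast h0
        rw [if_pos hp, if_pos h0]
        have h2 := ih (groups ++ [(cur : Int)]) 0
        simp only [Nat.cast_zero] at h2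
        rw [h2, List.append_assoc]
      · have hz : cur = 0 := by omega
        subst hz
        simp only [Nat.cast_zero, gt_iff_lt, lt_self_iff_false, if_false, List.nil_append]
        have h2 := ih groups 0
        simp only [Nat.cast_zero] at h2
        exact h2

theorem pvEmit_spec (l : List Char) :
    (∀ k : Nat, pvEmit (k + 1) l = ((k + 1 + pvLead l : Nat) : Int) :: pvRunsB (l.drop (pvLead l)))
    ∧ pvEmit 0 l = pvRunsB l := by
  induction l with
  | nil =>
    constructor
    · intro k; simp [pvEmit, pvLead, pvRunsB_nil]
    · simp [pvEmit, pvRunsB_nil]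
  | cons c rest ih =>
    constructor
    · intro k
      by_cases hc : c = '#'
      · have h1 : pvLead (c :: rest) = pvLead rest + 1 := by simp [pvLead, hc]
        simp only [pvEmit, if_pos hc, h1, List.drop_succ_cons]
        rw [ih.1 (k + 1)]
        congr 1
        push_cast
        ring
      · have h1 : pvLead (c :: rest) = 0 := by simp [pvLead, hc]
        simp only [pvEmit, if_neg hc, h1, List.drop_zero]
        rw [ih.2]
        rw [pvRunsB_cons, if_pos hc]
        simp
    · by_cases hc : c = '#'
      · simp only [pvEmit, if_pos hc]
        have := ih.1 0
        simp only [Nat.zero_add] at this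
        rw [this, pvRunsB_cons]
        simp [hc]
      · simp only [pvEmit, if_neg hc]
        rw [ih.2, pvRunsB_cons, if_pos hc]
        simp

-- ===== VERDICT (by name: the statement is the Claim_ definition above) =====
theorem check_current_contiguous_damaged_spec : Claim_equal_check_current_contiguous_damaged := by
  intro springs _
  unfold Spec_check_current_contiguous_damaged check_current_contiguous_damaged check_current_contiguous_damaged_alt
  have h := pvLoopA_spec springs.toList [] 0
  simp only [Nat.cast_zero, List.nil_append] at h
  rw [h, (pvEmit_spec springs.toList).2]
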